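-- pv_equiv track=rewrite | github.com/leonxnguyen/conversion-b10-b2 | binary_to_char.py | binary_to_ascii
-- ===== SOURCE A (Python) =====
-- b10_to_ascii = {0: ' ', 1: 'a', 2: 'b', 3: 'c', 4: 'd', 5: 'e',
--                 6: 'f', 7: 'g', 8: 'h', 9: 'i', 10: 'j',
--                 11: 'k', 12: 'l', 13: 'm', 14: 'n', 15: 'o',
--                 16: 'p', 17: 'q', 18: 'r', 19: 's', 20: 't',
--                 21: 'u', 22: 'v', 23: 'w', 24: 'x', 25: 'y',
--                 26: 'z', 27: '.', 28: ',', 29: '?', 30: '\'',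
--                 31: ':', 32: ';', 33: '(', 34: ')', 35: '!',
--                 36: '-'}
--
-- def binary_to_ascii(s: str) -> str:
--     res = ''
--     for s in s.split(' '):
--         counter = 0
--         total = 0
--         while counter < len(s):
--             if s[counter] == '1':
--                 total += 2 ** (len(s) - counter  - 1)
--             counter += 1
--         res += b10_to_ascii[total]
--     return res
-- ===== SOURCE B (Python) =====
-- TABLE = " abcdefghijklmnopqrstuvwxyz.,?':;()!-"
--
-- def binary_to_ascii(s: str) -> str:
--     out = []
--     total = 0
--     for c in s:
--         if c == ' ':
--             out.append(TABLE[total])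
--             total = 0
--         else:
--             total = total * 2 + (c == '1')
--     out.append(TABLE[total])
--     return ''.join(out)
-- ===== Notes on version B (the rewrite author's own statement) =====
-- stated objective: alternative
-- what changed: Drops the dict and the split-then-per-word inner loop entirely: B makes one fused left-to-right scan over the raw string, accumulating the current word's value with a multiply-add and flushing a character (indexed from a 37-char lookup string, not a dict) at each space and at the end; Pre_ excludes only inputs where both raise (word value > 36).
import Mathlib
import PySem

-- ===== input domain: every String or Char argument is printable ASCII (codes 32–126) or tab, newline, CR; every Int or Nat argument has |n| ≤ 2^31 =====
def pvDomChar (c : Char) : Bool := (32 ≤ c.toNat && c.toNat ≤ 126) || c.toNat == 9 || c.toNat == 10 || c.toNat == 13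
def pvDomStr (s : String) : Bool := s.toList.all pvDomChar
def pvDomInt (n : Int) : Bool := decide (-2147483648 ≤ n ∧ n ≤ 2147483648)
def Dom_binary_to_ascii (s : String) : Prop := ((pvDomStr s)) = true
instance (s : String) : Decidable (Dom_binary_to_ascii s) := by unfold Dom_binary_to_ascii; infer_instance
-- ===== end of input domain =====

-- B replaces A's split-then-per-word power summation (dict lookup per word) by a single fused scan
-- over the raw string with a multiply-add accumulator and a 37-char lookup string (objective: alternative).

-- ===== PORT A =====
-- A's module constant: the dict literal b10_to_ascii, keys 0..36
def pvTable : PySem.Dict Nat String := PySem.Dict.mk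
  [(0, " "), (1, "a"), (2, "b"), (3, "c"), (4, "d"), (5, "e"),
   (6, "f"), (7, "g"), (8, "h"), (9, "i"), (10, "j"),
   (11, "k"), (12, "l"), (13, "m"), (14, "n"), (15, "o"),
   (16, "p"), (17, "q"), (18, "r"), (19, "s"), (20, "t"),
   (21, "u"), (22, "v"), (23, "w"), (24, "x"), (25, "y"),
   (26, "z"), (27, "."), (28, ","), (29, "?"), (30, "'"),
   (31, ":"), (32, ";"), (33, "("), (34, ")"), (35, "!"),
   (36, "-")]

-- A's inner while-loop: counter scans the word, adding 2^(len-counter-1) for each '1'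
def pvALoop (w : List Char) (counter : Nat) (total : Nat) : Nat :=
  if h : counter < w.length then
    pvALoop w (counter + 1)
      (if w[counter] = '1' then total + 2 ^ (w.length - counter - 1) else total)
  else total
termination_by w.length - counter

-- b10_to_ascii[total] raises KeyError for total > 36; Pre_ excludes exactly those inputs,
-- so the "" default below is never reached on admitted inputs.
def binary_to_ascii (s : String) : String :=
  (PySem.Chars.splitOn s.toList [' ']).foldl
    (fun res w => res ++ (pvTable.getD (pvALoop w 0 0) "")) ""

-- ===== PORT B =====
-- B's module constant: TABLE, the 37 output characters indexed by value
def pvTableStr : List Char := (" abcdefghijklmnopqrstuvwxyz.,?':;()!-").toList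

-- TABLE[n]; IndexError for n > 36 — those inputs are excluded by Pre_, so the ' ' default is never reached
def pvTbl (n : Nat) : Char := pvTableStr.getD n ' '

-- B's single fused scan: multiply-add accumulator, flush a char at each space and at the end
def pvBGo : List Char → Nat → List Char → List Char
  | [], total, out => out ++ [pvTbl total]
  | c :: rest, total, out =>
      if c = ' ' then pvBGo rest 0 (out ++ [pvTbl total])
      else pvBGo rest (total * 2 + (if c = '1' then 1 else 0)) out

def binary_to_ascii_alt (s : String) : String := String.ofList (pvBGo s.toList 0 [])

-- ===== PRECONDITION & SPEC =====
-- the decimal value of a word (what A's loop and B's accumulator both compute)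
def pvVal (w : List Char) : Nat :=
  w.foldl (fun total c => total * 2 + (if c == '1' then 1 else 0)) 0

-- Pre_ excludes exactly the inputs on which A raises KeyError: a space-separated word whose
-- value exceeds 36, the largest key of b10_to_ascii (B raises IndexError there too).
def Pre_binary_to_ascii (s : String) : Prop :=
  ∀ w ∈ PySem.Chars.splitOn s.toList [' '], pvVal w ≤ 36

instance (s : String) : Decidable (Pre_binary_to_ascii s) := by
  unfold Pre_binary_to_ascii; infer_instance

def pvWitness_binary_to_ascii : String := "1000 101"

def Spec_binary_to_ascii (s : String) (out : String) : Prop := out = binary_to_ascii_alt s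
instance (s : String) (out : String) : Decidable (Spec_binary_to_ascii s out) := by
  unfold Spec_binary_to_ascii; infer_instance

-- ===== CLAIM (what is proved, stated in full; the proofs are below) =====
def Claim_equal_binary_to_ascii : Prop :=
  ∀ (s : String), Dom_binary_to_ascii s → Pre_binary_to_ascii s →
    Spec_binary_to_ascii s (binary_to_ascii s)

-- ===== LEMMAS AND PROOFS =====

-- a simple front-building split on single spaces (proof-side model of s.split(' '))
def pvSpl : List Char → List (List Char)
  | [] => [[]]
  | c :: r =>
      if c = ' ' then [] :: pvSpl r
      else match pvSpl r with
           | [] => [[c]]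
           | w :: ws => (c :: w) :: ws

theorem pvSpl_ne_nil (l : List Char) : pvSpl l ≠ [] := by
  cases l with
  | nil => simp [pvSpl]
  | cons c r =>
    simp only [pvSpl]
    split_ifs
    · simp
    · cases h : pvSpl r <;> simp

def pvConsFirst (p : List Char) : List (List Char) → List (List Char)
  | [] => [p]
  | w :: ws => (p ++ w) :: ws

theorem pvGo_eq (fuel : Nat) (l cur : List Char) (acc : List (List Char))
    (h : l.length ≤ fuel) :
    PySem.Chars.splitOn.go [' '] fuel l cur acc
      = acc.reverse ++ pvConsFirst cur.reverse (pvSpl l) := by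
  induction fuel generalizing l cur acc with
  | zero =>
    have : l = [] := by cases l <;> simp_all
    subst this
    simp [PySem.Chars.splitOn.go, pvSpl, pvConsFirst]
  | succ fuel ih =>
    cases l with
    | nil => simp [PySem.Chars.splitOn.go, pvSpl, pvConsFirst]
    | cons c rest =>
      rw [PySem.Chars.splitOn.go]
      by_cases hc : c = ' '
      · subst hc
        have hpre : [' '].isPrefixOf (' ' :: rest) = true := by
          simp [List.isPrefixOf]
        simp only [hpre, if_pos, List.length_cons, List.length_nil, List.drop_succ_cons,
          List.drop_zero]
        rw [ih rest [] (cur.reverse :: acc) (by simpa using Nat.lt_succ_iff.mp (by simpa using h))]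
        simp only [pvSpl, if_pos, pvConsFirst, List.reverse_cons, List.reverse_nil,
          List.nil_append, List.append_assoc, List.singleton_append]
        cases hr : pvSpl rest with
        | nil => exact absurd hr (pvSpl_ne_nil rest)
        | cons w ws => simp
      · have hpre : [' '].isPrefixOf (c :: rest) = false := by
          simp [List.isPrefixOf]; exact fun hh => hc hh.symm
        simp only [hpre, Bool.false_eq_true, if_false]
        rw [ih rest (c :: cur) acc (by simpa using Nat.lt_succ_iff.mp (by simpa using h))]
        simp only [pvSpl, hc, List.reverse_cons]
        cases hr : pvSpl rest with
        | nil => exact absurd hr (pvSpl_ne_nil rest)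
        | cons w ws => simp [pvConsFirst]

theorem splitOn_eq_spl (l : List Char) :
    PySem.Chars.splitOn l [' '] = pvSpl l := by
  rw [PySem.Chars.splitOn, pvGo_eq l.length.succ l [] [] (Nat.le_succ _)]
  cases h : pvSpl l with
  | nil => exact absurd h (pvSpl_ne_nil l)
  | cons w ws => simp [pvConsFirst]

-- Horner accumulation with an arbitrary seed
theorem pvVal_acc (w : List Char) (t : Nat) :
    w.foldl (fun total c => total * 2 + (if c == '1' then 1 else 0)) t
      = t * 2 ^ w.length + pvVal w := by
  induction w generalizing t with
  | nil => simp [pvVal]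
  | cons c cs ih =>
    rw [List.foldl_cons, ih]
    have h2 : pvVal (c :: cs) = (if c == '1' then 1 else 0) * 2 ^ cs.length + pvVal cs := by
      conv_lhs => rw [pvVal]
      rw [List.foldl_cons, ih]
      ring
    rw [h2, List.length_cons, pow_succ]
    ring

theorem pvVal_cons (c : Char) (cs : List Char) :
    pvVal (c :: cs) = (if c == '1' then 1 else 0) * 2 ^ cs.length + pvVal cs := by
  simp only [pvVal, List.foldl_cons]
  rw [pvVal_acc]
  unfold pvVal
  ring

-- A's power-summation loop computes the value of the unread suffix
theorem pvALoop_eq (w : List Char) (counter total : Nat) (h : counter ≤ w.length) :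
    pvALoop w counter total = total + pvVal (w.drop counter) := by
  by_cases hlt : counter < w.length
  · rw [pvALoop]
    simp only [hlt, dif_pos]
    rw [pvALoop_eq w (counter + 1) _ hlt]
    have hdrop : w.drop counter = w[counter] :: w.drop (counter + 1) :=
      List.drop_eq_getElem_cons hlt
    rw [hdrop, pvVal_cons]
    have hlen : (w.drop (counter + 1)).length = w.length - counter - 1 := by
      simp [List.length_drop]; omega
    rw [hlen]
    split_ifs with h1 h2 h2
    · ring
    · simp_all
    · simp_all
    · ring
  · have : counter = w.length := by omega
    rw [pvALoop]
    simp [this, pvVal]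
termination_by w.length - counter

theorem pvALoop_zero (w : List Char) : pvALoop w 0 0 = pvVal w := by
  simpa using pvALoop_eq w 0 0 (Nat.zero_le _)

-- the tail B still has to emit, given the words ahead and the partial value of the first one
def pvTag (t : Nat) : List (List Char) → List Char
  | [] => []
  | w :: ws => pvTbl (t * 2 ^ w.length + pvVal w) :: ws.map (fun w => pvTbl (pvVal w))

theorem pvTag_zero (l : List (List Char)) :
    pvTag 0 l = l.map (fun w => pvTbl (pvVal w)) := by
  cases l <;> simp [pvTag]

-- B's fused scan emits exactly the tagged words of the space split
theorem pvBGo_eq (cs : List Char) (total : Nat) (out : List Char) :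
    pvBGo cs total out = out ++ pvTag total (pvSpl cs) := by
  induction cs generalizing total out with
  | nil => simp [pvBGo, pvSpl, pvTag, pvVal]
  | cons c r ih =>
    by_cases hc : c = ' '
    · subst hc
      rw [pvBGo, if_pos rfl, ih]
      simp only [pvSpl, if_pos, pvTag, List.length_nil, pow_zero, Nat.mul_one,
        pvVal, List.foldl_nil, Nat.add_zero, List.append_assoc, List.singleton_append]
      cases hr : pvSpl r with
      | nil => exact absurd hr (pvSpl_ne_nil r)
      | cons w ws => simp
    · rw [pvBGo, if_neg hc, ih]
      simp only [pvSpl, hc, ite_false]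
      cases hr : pvSpl r with
      | nil => exact absurd hr (pvSpl_ne_nil r)
      | cons w ws =>
        have hval : total * 2 ^ (c :: w).length + pvVal (c :: w)
            = (total * 2 + (if c = '1' then 1 else 0)) * 2 ^ w.length + pvVal w := by
          rw [pvVal_cons]
          simp only [beq_iff_eq, List.length_cons, pow_succ]
          ring
        simp only [pvTag, hval]

-- the dict lookup agrees with the lookup string on every admitted value
theorem pvTable_getD (v : Nat) (h : v ≤ 36) :
    pvTable.getD v "" = String.ofList [pvTbl v] := by
  interval_cases v <;> rfl

-- join with the empty separator is flatten
theorem pvJoinNil (l : List (List Char)) : PySem.Chars.join [] l = l.flatten := by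
  induction l with
  | nil => simp [PySem.Chars.join_nil]
  | cons p rest ih =>
    cases rest with
    | nil => simp [PySem.Chars.join, List.intercalate]
    | cons q r =>
      rw [PySem.Chars.join_cons_cons, ih]
      simp

-- folding string concatenation = join "" of the mapped pieces
theorem pvFoldl_concat (l : List (List Char)) (f : List Char → String) (acc : String) :
    l.foldl (fun res w => res ++ f w) acc
      = acc ++ PySem.Str.join "" (l.map f) := by
  induction l generalizing acc with
  | nil =>
    apply String.ext
    simp [PySem.Str.join]
  | cons w ws ih =>
    simp only [List.foldl_cons, List.map_cons, ih]
    apply String.ext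
    simp [PySem.Str.join, pvJoinNil]

-- ===== VERDICT (by name: the statement is the Claim_ definition above) =====
theorem binary_to_ascii_spec : Claim_equal_binary_to_ascii := by
  intro s _ hpre
  unfold Spec_binary_to_ascii binary_to_ascii binary_to_ascii_alt
  unfold Pre_binary_to_ascii at hpre
  rw [splitOn_eq_spl] at hpre
  rw [pvFoldl_concat, splitOn_eq_spl, pvBGo_eq, pvTag_zero]
  simp only [pvALoop_zero]
  have hmap : (pvSpl s.toList).map (fun w => pvTable.getD (pvVal w) "")
      = (pvSpl s.toList).map (fun w => String.ofList [pvTbl (pvVal w)]) :=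
    List.map_congr_left (fun w hw => pvTable_getD _ (hpre w hw))
  rw [hmap]
  apply String.ext
  simp [List.map_map, Function.comp_def]
  rw [show (pvSpl s.toList).map (fun w => [pvTbl (pvVal w)])
      = ((pvSpl s.toList).map (fun w => pvTbl (pvVal w))).map (fun c => [c]) by simp]
  exact PySem.Chars.join_nil_singletons _
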